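-- pv_equiv track=rewrite | github.com/aczelandi/aoc-2024 | aoc2024/day_9/solution.py | _get_free_space_intervals
-- ===== SOURCE A (Python) =====
-- def _get_free_space_intervals(disk_map: list[str]) -> list[tuple[int, int]]:
--     free_spaces = [i for i, val in enumerate(disk_map) if val == '.']
--     intervals = []
--     start = free_spaces[0]
--
--     for prev, curr in zip(free_spaces, free_spaces[1:]):
--         if curr != prev + 1:
--             intervals.append((start, prev))
--             start = curr
--     intervals.append((start, free_spaces[-1]))  # Add the last interval
--
--     return intervals
-- ===== SOURCE B (Python) =====
-- def _get_free_space_intervals(disk_map: list[str]) -> list[tuple[int, int]]: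
--     intervals = []
--     start = None
--     for i, val in enumerate(disk_map):
--         if val == '.':
--             if start is None:
--                 start = i
--         elif start is not None:
--             intervals.append((start, i - 1))
--             start = None
--     if start is not None:
--         intervals.append((start, len(disk_map) - 1))
--     return intervals
-- ===== Notes on version B (the rewrite author's own statement) =====
-- stated objective: simpler
-- what changed: B replaces A's two-phase approach (build the full list of free indices, then pair-scan zip(fs, fs[1:]) for gaps) by one direct run-tracking pass over the disk map with a nullable run start; no index list is materialised.
-- outside the precondition, e.g. on _get_free_space_intervals([]): A raises IndexError, B returns []; on _get_free_space_intervals(['a']): A raises IndexError, B returns []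
import Mathlib
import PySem

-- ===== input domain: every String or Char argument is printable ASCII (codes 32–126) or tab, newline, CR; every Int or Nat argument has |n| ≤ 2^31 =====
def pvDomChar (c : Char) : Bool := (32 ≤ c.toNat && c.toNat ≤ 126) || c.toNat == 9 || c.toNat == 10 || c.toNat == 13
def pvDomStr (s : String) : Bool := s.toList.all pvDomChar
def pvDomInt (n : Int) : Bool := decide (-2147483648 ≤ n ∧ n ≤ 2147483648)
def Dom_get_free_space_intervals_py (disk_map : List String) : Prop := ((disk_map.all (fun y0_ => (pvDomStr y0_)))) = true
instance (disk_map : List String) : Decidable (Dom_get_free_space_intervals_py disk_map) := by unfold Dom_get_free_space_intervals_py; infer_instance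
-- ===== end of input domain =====

-- B replaces A's two-phase scheme (materialise the list of free indices, then gap-scan
-- zip(fs, fs[1:])) by a single direct run-tracking pass with a nullable run start: simpler.

-- ===== PORT A =====
-- loop body of A's 'for prev, curr in zip(...)'
def pvStepA (st : List (Int × Int) × Int) (pc : Int × Int) : List (Int × Int) × Int :=
  if pc.2 ≠ pc.1 + 1 then (st.1 ++ [(st.2, pc.1)], pc.2) else st

def get_free_space_intervals_py (disk_map : List String) : List (Int × Int) :=
  let free_spaces : List Int :=
    ((PySem.List.enumerate disk_map).filter (fun p => p.2 == ".")).map (fun p => p.1)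
  -- free_spaces[0] raises IndexError when there is no '.'; those inputs are outside Pre_
  let start : Int := (PySem.List.pyGet? free_spaces 0).getD 0
  let st := (free_spaces.zip free_spaces.tail).foldl pvStepA ([], start)
  st.1 ++ [(st.2, (PySem.List.pyGet? free_spaces (-1)).getD 0)]

-- ===== PORT B =====
-- loop body of B's single pass over enumerate(disk_map)
def pvStepB (st : List (Int × Int) × Option Int) (p : Int × String) : List (Int × Int) × Option Int :=
  if p.2 == "." then
    match st.2 with
    | none => (st.1, some p.1)
    | some s => (st.1, some s)
  else
    match st.2 with
    | some s => (st.1 ++ [(s, p.1 - 1)], none)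
    | none => (st.1, none)

def get_free_space_intervals_py_alt (disk_map : List String) : List (Int × Int) :=
  let st := (PySem.List.enumerate disk_map).foldl pvStepB ([], none)
  match st.2 with
  | some s => st.1 ++ [(s, (disk_map.length : Int) - 1)]
  | none => st.1

-- ===== PRECONDITION & SPEC =====
-- Pre_ excludes exactly the disk maps with no '.', on which Python A raises IndexError
-- (free_spaces[0] on an empty list); B returns [] there.
def Pre_get_free_space_intervals_py (disk_map : List String) : Prop := "." ∈ disk_map
instance (disk_map : List String) : Decidable (Pre_get_free_space_intervals_py disk_map) := by unfold Pre_get_free_space_intervals_py; infer_instance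

def pvWitness_get_free_space_intervals_py : List String := [".", "a", ".", "."]

def Spec_get_free_space_intervals_py (disk_map : List String) (out : List (Int × Int)) : Prop := out = get_free_space_intervals_py_alt disk_map
instance (disk_map : List String) (out : List (Int × Int)) : Decidable (Spec_get_free_space_intervals_py disk_map out) := by unfold Spec_get_free_space_intervals_py; infer_instance

-- ===== CLAIM (what is proved, stated in full; the proofs are below) =====
def Claim_equal_get_free_space_intervals_py : Prop := ∀ (disk_map : List String), Dom_get_free_space_intervals_py disk_map → Pre_get_free_space_intervals_py disk_map → Spec_get_free_space_intervals_py disk_map (get_free_space_intervals_py disk_map)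

-- ===== LEMMAS AND PROOFS =====

-- reference function: the maximal runs of a strictly increasing index list
def runsGo (s p : Int) : List Int → List (Int × Int)
  | [] => [(s, p)]
  | c :: cs => if c ≠ p + 1 then (s, p) :: runsGo c c cs else runsGo s c cs

def runs : List Int → List (Int × Int)
  | [] => []
  | c :: cs => runsGo c c cs

def freeIdx (vs : List String) (i : Int) : List Int :=
  ((PySem.List.enumerate vs i).filter (fun p => p.2 == ".")).map (fun p => p.1)

theorem freeIdx_nil (i : Int) : freeIdx [] i = [] := rfl

theorem freeIdx_cons (v : String) (vs : List String) (i : Int) :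
    freeIdx (v :: vs) i =
      if v == "." then i :: freeIdx vs (i + 1) else freeIdx vs (i + 1) := by
  simp only [freeIdx, PySem.List.enumerate_cons, List.filter_cons]
  by_cases h : v == "." <;> simp [h]

theorem freeIdx_ge (vs : List String) (i : Int) : ∀ x ∈ freeIdx vs i, i ≤ x := by
  induction vs generalizing i with
  | nil => simp [freeIdx_nil]
  | cons v vs ih =>
    intro x hx
    rw [freeIdx_cons] at hx
    by_cases h : v == "."
    · simp [h] at hx
      rcases hx with rfl | hx
      · exact le_refl x
      · have := ih (i + 1) x hx; omega
    · simp [h] at hx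
      have := ih (i + 1) x hx; omega

theorem freeIdx_ne_nil (vs : List String) (i : Int) (h : "." ∈ vs) : freeIdx vs i ≠ [] := by
  induction vs generalizing i with
  | nil => cases h
  | cons v vs ih =>
    rw [freeIdx_cons]
    by_cases hv : v == "."
    · simp [hv]
    · rcases List.mem_cons.mp h with rfl | h'
      · simp at hv
      · simpa [hv] using ih (i + 1) h'

-- A-side: the pair-gap fold over a nonempty index list computes runsGo
theorem lemA (xs : List Int) : ∀ (p s : Int) (acc : List (Int × Int)),
    ((((p :: xs).zip xs).foldl pvStepA (acc, s)).1
      ++ [((((p :: xs).zip xs).foldl pvStepA (acc, s)).2, (p :: xs).getLastD 0)])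
    = acc ++ runsGo s p xs := by
  induction xs with
  | nil => intro p s acc; simp [runsGo]
  | cons c cs ih =>
    intro p s acc
    have hz : (p :: c :: cs).zip (c :: cs) = (p, c) :: ((c :: cs).zip cs) := rfl
    rw [hz, List.foldl_cons]
    by_cases h : c ≠ p + 1
    · have hst : pvStepA (acc, s) (p, c) = (acc ++ [(s, p)], c) := by
        simp [pvStepA, h]
      rw [hst]
      have := ih c c (acc ++ [(s, p)])
      simp only [List.getLastD_cons] at *
      rw [this, runsGo]
      simp [h]
    · have hst : pvStepA (acc, s) (p, c) = (acc, s) := by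
        simp [pvStepA, h]
      rw [hst]
      have := ih c s acc
      simp only [List.getLastD_cons] at *
      rw [this, runsGo]
      simp [h]

-- B-side: tail handler of B's fold
def applyTail (n : Int) (st : List (Int × Int) × Option Int) : List (Int × Int) :=
  match st.2 with
  | some s => st.1 ++ [(s, n - 1)]
  | none => st.1

theorem lemB (vs : List String) : ∀ (i : Int) (acc : List (Int × Int)) (o : Option Int),
    applyTail (i + vs.length) ((PySem.List.enumerate vs i).foldl pvStepB (acc, o))
    = acc ++ (match o with
              | none => runs (freeIdx vs i)
              | some s => runsGo s (i - 1) (freeIdx vs i)) := by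
  induction vs with
  | nil =>
    intro i acc o
    cases o <;> simp [applyTail, runs, runsGo, freeIdx_nil]
  | cons v vs ih =>
    intro i acc o
    rw [PySem.List.enumerate_cons, List.foldl_cons]
    have hlen : i + ((v :: vs).length : Int) = (i + 1) + (vs.length : Int) := by
      simp; omega
    rw [hlen, freeIdx_cons]
    by_cases hv : v == "."
    · cases o with
      | none =>
        have hst : pvStepB (acc, none) (i, v) = (acc, some i) := by simp [pvStepB, hv]
        rw [hst, ih (i + 1) acc (some i)]
        simp only [hv]
        have : (i + 1) - 1 = i := by omega
        rw [this]
        rfl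
      | some s =>
        have hst : pvStepB (acc, some s) (i, v) = (acc, some s) := by simp [pvStepB, hv]
        rw [hst, ih (i + 1) acc (some s)]
        simp only [hv]
        have h1 : (i + 1) - 1 = i := by omega
        have h2 : ¬ (i ≠ (i - 1) + 1) := by omega
        rw [h1]
        simp [runsGo]
    · cases o with
      | none =>
        have hst : pvStepB (acc, none) (i, v) = (acc, none) := by simp [pvStepB, hv]
        rw [hst, ih (i + 1) acc none]
        simp [hv]
      | some s =>
        have hst : pvStepB (acc, some s) (i, v) = (acc ++ [(s, i - 1)], none) := by
          simp [pvStepB, hv]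
        rw [hst, ih (i + 1) (acc ++ [(s, i - 1)]) none]
        simp only [hv, Bool.false_eq_true, if_false, List.append_assoc]
        congr 1
        cases hF : freeIdx vs (i + 1) with
        | nil => simp [runs, runsGo]
        | cons c cs =>
          have hc : i + 1 ≤ c := freeIdx_ge vs (i + 1) c (by rw [hF]; exact List.mem_cons_self ..)
          have hne : c ≠ i := by omega
          simp [runs, runsGo, hne]

theorem altEq (disk_map : List String) :
    get_free_space_intervals_py_alt disk_map = runs (freeIdx disk_map 0) := by
  have := lemB disk_map 0 [] none
  simp only [zero_add] at this
  show applyTail (disk_map.length : Int)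
      ((PySem.List.enumerate disk_map).foldl pvStepB ([], none)) = _
  rw [this]
  simp

theorem aEq (disk_map : List String) (h : "." ∈ disk_map) :
    get_free_space_intervals_py disk_map = runs (freeIdx disk_map 0) := by
  unfold get_free_space_intervals_py
  cases hF : freeIdx disk_map 0 with
  | nil => exact absurd hF (freeIdx_ne_nil disk_map 0 h)
  | cons f rest =>
    have hfs : ((PySem.List.enumerate disk_map).filter (fun p => p.2 == ".")).map
        (fun p => p.1) = f :: rest := hF
    simp only [hfs]
    have h0 : (PySem.List.pyGet? (f :: rest) 0).getD 0 = f := by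
      rw [PySem.List.pyGet?_zero_cons]; rfl
    have hlast : (PySem.List.pyGet? (f :: rest) (-1)).getD 0 = (f :: rest).getLastD 0 := by
      rw [PySem.List.pyGet?_neg_one]
      cases hg : (f :: rest).getLast? with
      | none => simp at hg
      | some x => simp [List.getLastD_eq_getLast?, hg]
    rw [h0, hlast]
    have htail : (f :: rest).tail = rest := rfl
    rw [htail]
    rw [lemA rest f f []]
    rfl

-- ===== VERDICT (by name: the statement is the Claim_ definition above) =====
theorem get_free_space_intervals_py_spec : Claim_equal_get_free_space_intervals_py := by
  intro disk_map _ hpre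
  unfold Spec_get_free_space_intervals_py
  rw [aEq disk_map hpre, altEq disk_map]
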